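-- pv_equiv track=rewrite | github.com/AokoC/MahJourney | src/pages/quiz.py | parse_answer_input_tiles
-- ===== SOURCE A (Python) =====
-- def parse_answer_input_tiles(answer_input):
--     """Parse answer input into individual tiles (...)"""
--
--     if not answer_input:
--         return []
--
--     tiles = []
--     i = 0
--     while i < len(answer_input):
--         if answer_input[i] in '0123456789':
--             if i + 1 < len(answer_input) and answer_input[i + 1] in 'mpsz':
--                 tiles.append(answer_input[i] + answer_input[i + 1])
--                 i += 2
--             else:
--                 i += 1
--         else:
--             i += 1
--
--     return tiles
-- ===== SOURCE B (Python) =====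
-- import re
--
-- def parse_answer_input_tiles(answer_input):
--     """Parse answer input into individual tiles (...)"""
--     if not answer_input:
--         return []
--     return re.findall(r'[0-9][mpsz]', answer_input)
-- ===== Notes on version B (the rewrite author's own statement) =====
-- stated objective: idiomatic
-- what changed: Replaces the manual index-bookkeeping while-loop and list accumulation with a single re.findall of the pattern [0-9][mpsz], whose non-overlapping left-to-right scan reproduces the original advance-by-2-on-hit/1-on-miss behaviour.
import Mathlib
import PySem

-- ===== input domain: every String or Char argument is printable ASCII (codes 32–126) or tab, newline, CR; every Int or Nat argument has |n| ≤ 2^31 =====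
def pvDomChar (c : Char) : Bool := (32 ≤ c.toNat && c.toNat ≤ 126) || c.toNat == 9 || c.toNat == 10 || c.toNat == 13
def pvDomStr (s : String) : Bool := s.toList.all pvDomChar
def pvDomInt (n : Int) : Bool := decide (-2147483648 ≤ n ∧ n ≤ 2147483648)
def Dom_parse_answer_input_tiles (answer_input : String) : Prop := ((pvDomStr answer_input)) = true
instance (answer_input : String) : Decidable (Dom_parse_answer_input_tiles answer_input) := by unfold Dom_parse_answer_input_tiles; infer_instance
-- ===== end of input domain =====

-- B replaces A's manual index-bookkeeping while-loop with a single regex scan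
-- (re.findall of '[0-9][mpsz]'), ported as the equivalent left-to-right
-- non-overlapping pattern-match recursion; objective: idiomatic.

-- ===== PORT A =====
-- while-loop over index i, transliterated as recursion on the remaining length
def parseA_loop (cs : List Char) (i : Nat) : List String :=
  if h : i < cs.length then
    if cs[i] ∈ "0123456789".toList then
      if h2 : i + 1 < cs.length then
        if cs[i + 1] ∈ "mpsz".toList then
          String.ofList [cs[i], cs[i + 1]] :: parseA_loop cs (i + 2)
        else parseA_loop cs (i + 1)
      else parseA_loop cs (i + 1)
    else parseA_loop cs (i + 1)
  else []
termination_by cs.length - i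

def parse_answer_input_tiles (answer_input : String) : List String :=
  if answer_input = "" then []
  else parseA_loop answer_input.toList 0

-- ===== PORT B =====
-- re.findall(r'[0-9][mpsz]', s): left-to-right non-overlapping scan for the
-- fixed two-character pattern — exact for this pattern (digit then one of mpsz,
-- advance past both on a match, else advance one position).
def parseB_scan : List Char → List String
  | [] => []
  | [_] => []
  | c :: s :: rest =>
    if c ∈ "0123456789".toList ∧ s ∈ "mpsz".toList then
      String.ofList [c, s] :: parseB_scan rest
    else parseB_scan (s :: rest)

def parse_answer_input_tiles_alt (answer_input : String) : List String :=
  if answer_input = "" then []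
  else parseB_scan answer_input.toList

-- ===== PRECONDITION & SPEC =====
def Spec_parse_answer_input_tiles (answer_input : String) (out : List String) : Prop := out = parse_answer_input_tiles_alt answer_input
instance (answer_input : String) (out : List String) : Decidable (Spec_parse_answer_input_tiles answer_input out) := by unfold Spec_parse_answer_input_tiles; infer_instance

-- ===== CLAIM (what is proved, stated in full; the proofs are below) =====
def Claim_equal_parse_answer_input_tiles : Prop := ∀ (answer_input : String), Dom_parse_answer_input_tiles answer_input → Spec_parse_answer_input_tiles answer_input (parse_answer_input_tiles answer_input)

-- ===== LEMMAS AND PROOFS =====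

theorem parseA_loop_eq_scan (cs : List Char) (i : Nat) :
    parseA_loop cs i = parseB_scan (cs.drop i) := by
  induction i using parseA_loop.induct (cs := cs) with
  | case1 i h hd h2 hs ih =>
    rw [parseA_loop, dif_pos h, if_pos hd, dif_pos h2, if_pos hs,
        List.drop_eq_getElem_cons h, List.drop_eq_getElem_cons h2]
    simp only [parseB_scan]
    rw [if_pos ⟨hd, hs⟩, ih]
  | case2 i h hd h2 hs ih =>
    rw [parseA_loop, dif_pos h, if_pos hd, dif_pos h2, if_neg hs,
        List.drop_eq_getElem_cons h, List.drop_eq_getElem_cons h2]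
    simp only [parseB_scan]
    rw [if_neg (fun hc => hs hc.2), ← List.drop_eq_getElem_cons h2, ih]
  | case3 i h hd h2 ih =>
    rw [parseA_loop, dif_pos h, if_pos hd, dif_neg h2]
    have hnil : cs.drop (i + 1) = [] := List.drop_eq_nil_of_le (by omega)
    rw [List.drop_eq_getElem_cons h, hnil, ih, hnil]
    simp [parseB_scan]
  | case4 i h hd ih =>
    rw [parseA_loop, dif_pos h, if_neg hd, List.drop_eq_getElem_cons h, ih]
    cases hdrop : cs.drop (i + 1) with
    | nil => simp [parseB_scan]
    | cons s rest =>
      simp only [parseB_scan]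
      rw [if_neg (fun hc => hd hc.1)]
  | case5 i h =>
    rw [parseA_loop, dif_neg h, List.drop_eq_nil_of_le (by omega)]
    rfl

-- ===== VERDICT (by name: the statement is the Claim_ definition above) =====
theorem parse_answer_input_tiles_spec : Claim_equal_parse_answer_input_tiles := by
  intro s _
  unfold Spec_parse_answer_input_tiles parse_answer_input_tiles parse_answer_input_tiles_alt
  by_cases h : s = ""
  · simp [h]
  · simp only [if_neg h]
    rw [parseA_loop_eq_scan, List.drop_zero]
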